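-- pv_equiv track=rewrite | github.com/F6JO/okx-runnn | module/historyController.py | _compute_missing_ranges
-- ===== SOURCE A (Python) =====
-- from typing import Callable, Dict, Iterable, List, Optional, Tuple
--
-- def _compute_missing_ranges(
--
--     timestamps: List[int],
--     step: int,
--     start_ts: int,
--     end_ts: int,
-- ) -> List[Tuple[int, int]]:
--     """计算缺失区间。"""
--     if not timestamps:
--         return [(start_ts, end_ts)] if start_ts <= end_ts else []
--
--     missing: List[Tuple[int, int]] = []
--     expected = start_ts
--
--     for ts in timestamps:
--         if ts < start_ts:
--             continue
--         if ts > end_ts: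
--             break
--         if ts > expected:
--             missing.append((expected, ts - step))
--         expected = ts + step
--
--     if expected <= end_ts:
--         missing.append((expected, end_ts))
--
--     return [
--         (ms, me)
--         for ms, me in missing
--         if ms <= me
--     ]
-- ===== SOURCE B (Python) =====
-- from typing import List, Tuple
--
-- def _compute_missing_ranges(
--     timestamps: List[int],
--     step: int,
--     start_ts: int,
--     end_ts: int,
-- ) -> List[Tuple[int, int]]:
--     """计算缺失区间 (sentinel + pairwise-gap formulation)."""
--     considered: List[int] = []
--     for ts in timestamps:
--         if ts < start_ts:
--             continue
--         if ts > end_ts: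
--             break
--         considered.append(ts)
--
--     seq = [start_ts - step] + considered
--     missing = [
--         (a + step, b - step)
--         for a, b in zip(seq, seq[1:])
--         if b > a + step and a + step <= b - step
--     ]
--     tail = seq[-1] + step
--     if tail <= end_ts:
--         missing.append((tail, end_ts))
--     return missing
-- ===== Notes on version B (the rewrite author's own statement) =====
-- stated objective: alternative
-- what changed: Replaces A's running 'expected' pointer with its three boundary special-cases and a final filtering pass by a sentinel-bracketed sequence [start_ts-step]+considered whose consecutive pairs directly yield the valid gap intervals, with the trailing interval handled once off the sequence's last element.
import Mathlib
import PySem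

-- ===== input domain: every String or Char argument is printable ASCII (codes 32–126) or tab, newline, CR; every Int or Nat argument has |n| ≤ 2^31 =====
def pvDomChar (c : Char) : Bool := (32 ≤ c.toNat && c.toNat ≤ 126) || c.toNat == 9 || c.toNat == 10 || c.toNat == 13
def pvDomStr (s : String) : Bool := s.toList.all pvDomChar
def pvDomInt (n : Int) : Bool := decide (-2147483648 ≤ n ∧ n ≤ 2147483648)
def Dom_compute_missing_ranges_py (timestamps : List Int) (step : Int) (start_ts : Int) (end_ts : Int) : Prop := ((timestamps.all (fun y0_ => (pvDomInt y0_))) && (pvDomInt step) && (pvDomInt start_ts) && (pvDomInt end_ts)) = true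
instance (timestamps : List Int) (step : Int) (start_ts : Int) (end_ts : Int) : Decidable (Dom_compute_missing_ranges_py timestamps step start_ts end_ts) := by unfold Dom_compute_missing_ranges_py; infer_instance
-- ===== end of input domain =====

-- B replaces A's running `expected` pointer and final filter pass by a sentinel-bracketed
-- sequence whose consecutive pairs yield the gaps directly (objective: alternative decomposition).

-- ===== PORT A =====
-- A's for-loop with continue/break: state = (missing, expected); break returns the state early.
def aLoop (l : List Int) (expected : Int) (missing : List (Int × Int))
    (step start_ts end_ts : Int) : List (Int × Int) × Int :=
  match l with
  | [] => (missing, expected)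
  | ts :: rest =>
    if ts < start_ts then aLoop rest expected missing step start_ts end_ts
    else if ts > end_ts then (missing, expected)
    else aLoop rest (ts + step)
      (if ts > expected then missing ++ [(expected, ts - step)] else missing)
      step start_ts end_ts

def compute_missing_ranges_py (timestamps : List Int) (step : Int) (start_ts : Int) (end_ts : Int) : List (Int × Int) :=
  if timestamps = [] then
    (if start_ts ≤ end_ts then [(start_ts, end_ts)] else [])
  else
    let r := aLoop timestamps start_ts [] step start_ts end_ts
    let missing := if r.2 ≤ end_ts then r.1 ++ [(r.2, end_ts)] else r.1
    missing.filter (fun p => p.1 ≤ p.2)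

-- ===== PORT B =====
-- B's selection loop with continue/break, producing the `considered` list.
def bConsidered (l : List Int) (start_ts end_ts : Int) : List Int :=
  match l with
  | [] => []
  | ts :: rest =>
    if ts < start_ts then bConsidered rest start_ts end_ts
    else if ts > end_ts then []
    else ts :: bConsidered rest start_ts end_ts

def compute_missing_ranges_py_alt (timestamps : List Int) (step : Int) (start_ts : Int) (end_ts : Int) : List (Int × Int) :=
  let considered := bConsidered timestamps start_ts end_ts
  let seq := (start_ts - step) :: considered
  let missing :=
    ((seq.zip seq.tail).filter
        (fun ab => ab.2 > ab.1 + step ∧ ab.1 + step ≤ ab.2 - step)).map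
      (fun ab => (ab.1 + step, ab.2 - step))
  let tail := seq.getLastD (start_ts - step) + step
  if tail ≤ end_ts then missing ++ [(tail, end_ts)] else missing

-- ===== PRECONDITION & SPEC =====
def Spec_compute_missing_ranges_py (timestamps : List Int) (step : Int) (start_ts : Int) (end_ts : Int) (out : List (Int × Int)) : Prop := out = compute_missing_ranges_py_alt timestamps step start_ts end_ts
instance (timestamps : List Int) (step : Int) (start_ts : Int) (end_ts : Int) (out : List (Int × Int)) : Decidable (Spec_compute_missing_ranges_py timestamps step start_ts end_ts out) := by unfold Spec_compute_missing_ranges_py; infer_instance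

-- ===== CLAIM (what is proved, stated in full; the proofs are below) =====
def Claim_equal_compute_missing_ranges_py : Prop := ∀ (timestamps : List Int) (step : Int) (start_ts : Int) (end_ts : Int), Dom_compute_missing_ranges_py timestamps step start_ts end_ts → Spec_compute_missing_ranges_py timestamps step start_ts end_ts (compute_missing_ranges_py timestamps step start_ts end_ts)

-- ===== LEMMAS AND PROOFS =====

-- gaps of B's pairwise pass over seq = a :: c, in recursive form
def bGaps (a : Int) (c : List Int) (step : Int) : List (Int × Int) :=
  match c with
  | [] => []
  | b :: rest =>
    (if b > a + step ∧ a + step ≤ b - step then [(a + step, b - step)] else []) ++ bGaps b rest step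

lemma bGaps_eq_zip (a : Int) (c : List Int) (step : Int) :
    (((((a :: c).zip c).filter
        (fun ab => ab.2 > ab.1 + step ∧ ab.1 + step ≤ ab.2 - step)).map
      (fun ab => (ab.1 + step, ab.2 - step))) : List (Int × Int)) = bGaps a c step := by
  induction c generalizing a with
  | nil => simp [bGaps]
  | cons b rest ih =>
    simp only [List.zip_cons_cons, List.filter_cons, bGaps]
    by_cases h : b > a + step ∧ a + step ≤ b - step
    · simp [h, ← ih b]
    · simp [h, ← ih b]

-- A's loop accumulator lemma
lemma aLoop_acc (l : List Int) (e : Int) (m : List (Int × Int)) (step st en : Int) :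
    aLoop l e m step st en = (m ++ (aLoop l e [] step st en).1, (aLoop l e [] step st en).2) := by
  induction l generalizing e m with
  | nil => simp [aLoop]
  | cons ts rest ih =>
    simp only [aLoop]
    by_cases h1 : ts < st
    · rw [if_pos h1, if_pos h1, ih]
    · by_cases h2 : ts > en
      · simp [h1, h2]
      · rw [if_neg h1, if_neg h2, if_neg h1, if_neg h2]
        by_cases h3 : ts > e
        · rw [if_pos h3, if_pos h3, ih, ih (ts + step) ([] ++ [(e, ts - step)])]
          simp
        · rw [if_neg h3, if_neg h3, ih, ih (ts + step) []]

-- main invariant: A's loop (filtered) and final expected vs B's gaps and last element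
lemma main_inv (l : List Int) (a step st en : Int) :
    ((aLoop l (a + step) [] step st en).1.filter (fun p => p.1 ≤ p.2)
        = bGaps a (bConsidered l st en) step)
    ∧ (aLoop l (a + step) [] step st en).2 = (bConsidered l st en).getLastD a + step := by
  induction l generalizing a with
  | nil => simp [aLoop, bConsidered, bGaps]
  | cons ts rest ih =>
    simp only [aLoop, bConsidered]
    by_cases h1 : ts < st
    · simpa [h1] using ih a
    · by_cases h2 : ts > en
      · simp [h1, h2, bGaps]
      · simp only [h1, h2, if_false]
        rw [aLoop_acc rest (ts + step)]
        obtain ⟨ih1, ih2⟩ := ih ts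
        constructor
        · rw [List.filter_append, ih1]
          by_cases h3 : ts > a + step
          · simp only [h3, ite_true, bGaps]
            by_cases h4 : a + step ≤ ts - step
            · simp [List.filter, h4]
            · simp [List.filter, h4]
          · simp only [h3, ite_false, bGaps]
            simp [h3]
        · rw [ih2]
          cases hbc : bConsidered rest st en <;> simp [List.getLastD]

-- ===== VERDICT (by name: the statement is the Claim_ definition above) =====
theorem compute_missing_ranges_py_spec : Claim_equal_compute_missing_ranges_py := by
  intro timestamps step start_ts end_ts _
  unfold Spec_compute_missing_ranges_py compute_missing_ranges_py compute_missing_ranges_py_alt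
  have key := main_inv timestamps (start_ts - step) step start_ts end_ts
  rw [show start_ts - step + step = start_ts by ring] at key
  obtain ⟨k1, k2⟩ := key
  cases timestamps with
  | nil =>
    simp [bConsidered, List.getLastD]
  | cons t rest =>
    simp only [reduceCtorEq, if_false, List.tail_cons, List.getLastD_cons]
    rw [bGaps_eq_zip]
    by_cases h : (aLoop (t :: rest) start_ts [] step start_ts end_ts).2 ≤ end_ts
    · rw [if_pos h, List.filter_append, k1, k2]
      rw [k2] at h
      rw [if_pos h]
      have h' : (bConsidered (t :: rest) start_ts end_ts).getLast?.getD (start_ts - step) + step ≤ end_ts := by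
        simpa [List.getLastD_eq_getLast?] using h
      simp [List.filter, h']
    · rw [if_neg h, k1]
      rw [k2] at h
      rw [if_neg h]
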